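-- pv_equiv track=rewrite | github.com/Gryhon/hll_discord_utils | rcon/discord/autolevel.py | get_last_parenthesis_content
-- ===== SOURCE A (Python) =====
-- def get_last_parenthesis_content(text):
--     # Den Text von hinten durchgehen
--     open_paren = None
--     close_paren = None
--     for i in range(len(text) - 1, -1, -1):
--         if text[i] == ')':
--             close_paren = i
--         elif text[i] == '(':
--             open_paren = i
--             if close_paren is not None:
--                 # Den Inhalt zwischen den Klammern extrahieren
--                 return text[open_paren + 1:close_paren]
--
--     return None  # Falls keine Klammern gefunden werden
-- ===== SOURCE B (Python) =====
-- def get_last_parenthesis_content(text):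
--     # Single forward pass: remember the most recent '(' and overwrite the
--     # result each time a ')' closes it; the last completed pair wins.
--     start = None
--     res = None
--     for i, ch in enumerate(text):
--         if ch == '(':
--             start = i
--         elif ch == ')':
--             if start is not None:
--                 res = text[start + 1:i]
--                 start = None
--     return res
-- ===== Notes on version B (the rewrite author's own statement) =====
-- stated objective: alternative
-- what changed: Replaces the backward scan with early return (tracking the nearest closing parenthesis seen so far) by a single forward pass that remembers the most recent opening parenthesis and overwrites an accumulator with the content of each completed innermost pair, so the last completed pair wins.
import Mathlib
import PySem

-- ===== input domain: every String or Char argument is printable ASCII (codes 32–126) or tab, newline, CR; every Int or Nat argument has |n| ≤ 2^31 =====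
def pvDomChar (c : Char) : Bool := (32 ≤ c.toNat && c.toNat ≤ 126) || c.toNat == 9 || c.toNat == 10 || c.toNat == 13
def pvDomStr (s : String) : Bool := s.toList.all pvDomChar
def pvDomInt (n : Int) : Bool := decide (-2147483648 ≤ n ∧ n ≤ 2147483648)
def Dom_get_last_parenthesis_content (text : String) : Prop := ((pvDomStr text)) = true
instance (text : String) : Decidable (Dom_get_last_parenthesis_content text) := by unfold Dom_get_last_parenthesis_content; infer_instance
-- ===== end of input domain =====

-- B replaces A's backward scan + early return by one forward pass with a result accumulator (alternative decomposition, same cost).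

-- ===== PORT A =====
-- A's loop 'for i in range(len(text)-1,-1,-1)' with early return: recursion on i counting
-- down; the argument 'i+1' examines index i.  'open_paren = i' is only read immediately in
-- the same branch, so it is not carried as state.  text[i] is always in range here, so
-- getD is exact.
def aAux (text : String) : Nat → Option Nat → Option String
  | 0, _ => none
  | Nat.succ k, close =>
    let c := text.toList.getD k ' '
    if c = ')' then aAux text k (some k)
    else if c = '(' then
      match close with
      | some j => some (PySem.Str.slice text (some ((k : Int) + 1)) (some (j : Int)))
      | none => aAux text k none
    else aAux text k close

def get_last_parenthesis_content (text : String) : Option String :=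
  aAux text text.toList.length none

-- ===== PORT B =====
-- Source B's loop body 'for i, ch in enumerate(text)' as a fold step over the enumerated chars.
def bStep (text : String) (s : Option Int × Option String) (p : Int × Char) :
    Option Int × Option String :=
  if p.2 = '(' then (some p.1, s.2)
  else if p.2 = ')' then
    match s.1 with
    | some st => (none, some (PySem.Str.slice text (some (st + 1)) (some p.1)))
    | none => s
  else s

def get_last_parenthesis_content_alt (text : String) : Option String :=
  ((PySem.List.enumerate text.toList 0).foldl (bStep text) (none, none)).2

-- ===== PRECONDITION & SPEC =====
def Spec_get_last_parenthesis_content (text : String) (out : Option String) : Prop := out = get_last_parenthesis_content_alt text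
instance (text : String) (out : Option String) : Decidable (Spec_get_last_parenthesis_content text out) := by unfold Spec_get_last_parenthesis_content; infer_instance

-- ===== CLAIM (what is proved, stated in full; the proofs are below) =====
def Claim_equal_get_last_parenthesis_content : Prop := ∀ (text : String), Dom_get_last_parenthesis_content text → Spec_get_last_parenthesis_content text (get_last_parenthesis_content text)

-- ===== LEMMAS AND PROOFS =====

-- B's state after processing the first i characters.
def bState (text : String) (i : Nat) : Option Int × Option String :=
  (((PySem.List.enumerate text.toList 0).take i).foldl (bStep text) (none, none))

theorem bState_succ (text : String) (i : Nat) (hi : i < text.toList.length) :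
    bState text (i + 1) = bStep text (bState text i) ((i : Int), text.toList[i]) := by
  unfold bState
  rw [List.take_succ]
  have h : (PySem.List.enumerate text.toList 0)[i]? = some ((i : Int), text.toList[i]) := by
    rw [PySem.List.getElem?_enumerate]
    simp [List.getElem?_eq_getElem hi]
  rw [h]
  simp [List.foldl_append]

-- The main invariant: A's countdown with close-state corresponds to B's forward state.
theorem aAux_bState (text : String) (i : Nat) (hi : i ≤ text.toList.length) :
    (aAux text i none = (bState text i).2) ∧
    (∀ j : Nat, aAux text i (some j) =
      match (bState text i).1 with
      | some st => some (PySem.Str.slice text (some (st + 1)) (some (j : Int)))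
      | none => (bState text i).2) := by
  induction i with
  | zero =>
    constructor
    · rfl
    · intro j; rfl
  | succ k ih =>
    have hk : k < text.toList.length := Nat.lt_of_succ_le hi
    obtain ⟨ih1, ih2⟩ := ih (Nat.le_of_lt hk)
    have hget : text.toList.getD k ' ' = text.toList[k] := List.getD_eq_getElem _ _ hk
    rw [bState_succ text k hk]
    by_cases hR : text.toList[k] = ')'
    · -- ')' : A resets close to k; B completes a pair if start is set
      constructor
      · show aAux text (k + 1) none = _
        rw [aAux]; simp only [hget, hR, if_pos rfl]
        rw [ih2 k]
        cases h1 : (bState text k).1 with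
        | none => simp [bStep, hR, h1]
        | some st => simp [bStep, hR, h1]
      · intro j
        show aAux text (k + 1) (some j) = _
        rw [aAux]; simp only [hget, hR, if_pos rfl]
        rw [ih2 k]
        cases h1 : (bState text k).1 with
        | none => simp [bStep, hR, h1]
        | some st => simp [bStep, hR, h1]
    · by_cases hL : text.toList[k] = '('
      · -- '(' : A with close=some j returns the slice; B records start = k
        constructor
        · show aAux text (k + 1) none = _
          rw [aAux]; simp only [hget, hL]
          rw [if_neg (by decide)]; simp only [if_true]; rw [ih1]; simp [bStep]
        · intro j
          show aAux text (k + 1) (some j) = _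
          rw [aAux]; simp only [hget, hL]
          rw [if_neg (by decide)]; simp only [if_true]; simp [bStep]
      · -- other character: both states pass through unchanged
        have hb : bStep text (bState text k) ((k : Int), text.toList[k]) = bState text k := by
          simp [bStep, hR, hL]
        rw [hb]
        constructor
        · show aAux text (k + 1) none = _
          rw [aAux]; simp only [hget, if_neg hR, if_neg hL]
          exact ih1
        · intro j
          show aAux text (k + 1) (some j) = _
          rw [aAux]; simp only [hget, if_neg hR, if_neg hL]
          exact ih2 j

theorem alt_eq_bState (text : String) :
    get_last_parenthesis_content_alt text = (bState text text.toList.length).2 := by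
  unfold get_last_parenthesis_content_alt bState
  rw [List.take_of_length_le (by simp [PySem.List.length_enumerate])]

-- ===== VERDICT (by name: the statement is the Claim_ definition above) =====
theorem get_last_parenthesis_content_spec : Claim_equal_get_last_parenthesis_content := by
  intro text _
  unfold Spec_get_last_parenthesis_content
  rw [alt_eq_bState]
  exact (aAux_bState text text.toList.length le_rfl).1
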